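-- pv_equiv track=rewrite | github.com/davidmb12/Bio_ProyectoFinal | V_01/main.py | get_state_path
-- ===== SOURCE A (Python) =====
-- def get_state_path(seq,match_cols):
--     state_path =['S']
--     match_index = 0
--     last_match_index = None
--     ncol = len(seq)
--     for j in range(ncol):
--         if j in match_cols:
--             match_index +=1
--             if seq[j] =='-':
--                 state_path.append(f'D{match_index}')
--             else:
--                 state_path.append(f'M{match_index}')
--             last_match_index = match_index
--         else:
--             # Columna de insercion
--             if seq[j] !='-':
--                 # El estado de incersion se asocia al ultimo match (o 0 si no hay match previo)
--                 ins_state = f'I{last_match_index if last_match_index is not None else 0}'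
--                 state_path.append(ins_state)
--     state_path.append('E')
--     return state_path
-- ===== SOURCE B (Python) =====
-- def get_state_path(seq, match_cols):
--     n = len(seq)
--     # prefix[j] = number of match columns strictly before position j
--     prefix = [0]
--     for j in range(n):
--         prefix.append(prefix[j] + (1 if j in match_cols else 0))
--     path = ['S']
--     for j in range(n):
--         if j in match_cols:
--             path.append(('D' if seq[j] == '-' else 'M') + str(prefix[j] + 1))
--         elif seq[j] != '-':
--             path.append('I' + str(prefix[j]))
--     path.append('E')
--     return path
-- ===== Notes on version B (the rewrite author's own statement) =====
-- stated objective: alternative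
-- what changed: Replaces A's interleaved match_index/last_match_index accumulators with a precomputed prefix-count table of match columns, so the path is produced by a separate lookup pass (insertion states read prefix[j] directly instead of carried last-match state).
import Mathlib
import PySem

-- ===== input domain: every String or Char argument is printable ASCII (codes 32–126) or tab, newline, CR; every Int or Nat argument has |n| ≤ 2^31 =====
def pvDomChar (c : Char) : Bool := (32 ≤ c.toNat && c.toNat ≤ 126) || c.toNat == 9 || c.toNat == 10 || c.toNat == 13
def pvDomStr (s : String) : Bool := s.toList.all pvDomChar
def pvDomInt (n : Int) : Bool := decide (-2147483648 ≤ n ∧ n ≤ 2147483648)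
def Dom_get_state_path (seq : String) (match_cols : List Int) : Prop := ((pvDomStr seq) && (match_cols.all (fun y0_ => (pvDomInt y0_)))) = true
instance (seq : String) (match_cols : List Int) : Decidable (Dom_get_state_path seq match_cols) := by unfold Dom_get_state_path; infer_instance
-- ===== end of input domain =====

-- B replaces A's running match_index/last_match_index accumulators with a prefix-count
-- table of match columns and a lookup pass (objective: alternative decomposition, same cost).

-- ===== PORT A =====
-- loop body of A's single pass; state = (state_path, match_index, last_match_index)
def pvStepA (seq : String) (mc : List Int) (st : List String × Int × Option Int) (j : Int) :
    List String × Int × Option Int :=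
  if j ∈ mc then
    let mi' := st.2.1 + 1
    let path' :=
      if PySem.Str.pyGet? seq j = some '-' then st.1 ++ ["D" ++ PySem.Int.toStr mi']
      else st.1 ++ ["M" ++ PySem.Int.toStr mi']
    (path', mi', some mi')
  else
    if PySem.Str.pyGet? seq j ≠ some '-' then
      (st.1 ++ ["I" ++ PySem.Int.toStr (st.2.2.getD 0)], st.2.1, st.2.2)
    else st

def get_state_path (seq : String) (match_cols : List Int) : List String :=
  let ncol : Int := PySem.Str.len seq
  let st := (PySem.List.pyRange 0 ncol 1).foldl (pvStepA seq match_cols) (["S"], 0, none)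
  st.1 ++ ["E"]

-- ===== PORT B =====
-- first pass: prefix.append(prefix[j] + (1 if j in match_cols else 0))
def pvStepPrefix (mc : List Int) (px : List Int) (j : Int) : List Int :=
  px ++ [PySem.List.pyGetD px j 0 + (if j ∈ mc then 1 else 0)]

-- second pass: emit the state for column j by looking up prefix[j]
def pvStepB (seq : String) (mc : List Int) (px : List Int) (path : List String) (j : Int) :
    List String :=
  if j ∈ mc then
    path ++ [(if PySem.Str.pyGet? seq j = some '-' then "D" else "M") ++
              PySem.Int.toStr (PySem.List.pyGetD px j 0 + 1)]
  else if PySem.Str.pyGet? seq j ≠ some '-' then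
    path ++ ["I" ++ PySem.Int.toStr (PySem.List.pyGetD px j 0)]
  else path

def get_state_path_alt (seq : String) (match_cols : List Int) : List String :=
  let n : Int := PySem.Str.len seq
  let px := (PySem.List.pyRange 0 n 1).foldl (pvStepPrefix match_cols) [0]
  let path := (PySem.List.pyRange 0 n 1).foldl (pvStepB seq match_cols px) ["S"]
  path ++ ["E"]

-- ===== PRECONDITION & SPEC =====
def Spec_get_state_path (seq : String) (match_cols : List Int) (out : List String) : Prop := out = get_state_path_alt seq match_cols
instance (seq : String) (match_cols : List Int) (out : List String) : Decidable (Spec_get_state_path seq match_cols out) := by unfold Spec_get_state_path; infer_instance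

-- ===== CLAIM (what is proved, stated in full; the proofs are below) =====
def Claim_equal_get_state_path : Prop := ∀ (seq : String) (match_cols : List Int), Dom_get_state_path seq match_cols → Spec_get_state_path seq match_cols (get_state_path seq match_cols)

-- ===== LEMMAS AND PROOFS =====

-- number of match columns strictly below j
def pvCnt (mc : List Int) (j : Nat) : Int :=
  ((List.range j).countP (fun k => decide ((k : Int) ∈ mc)) : Int)

-- the path entries contributed by column j (common description of both programs)
def pvEnt (seq : String) (mc : List Int) (j : Nat) : List String :=
  if (j : Int) ∈ mc then
    [(if PySem.Str.pyGet? seq (j : Int) = some '-' then "D" else "M") ++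
      PySem.Int.toStr (pvCnt mc j + 1)]
  else if PySem.Str.pyGet? seq (j : Int) ≠ some '-' then
    ["I" ++ PySem.Int.toStr (pvCnt mc j)]
  else []

theorem pvCnt_zero (mc : List Int) : pvCnt mc 0 = 0 := by simp [pvCnt]

theorem pvCnt_succ (mc : List Int) (j : Nat) :
    pvCnt mc (j + 1) = pvCnt mc j + (if (j : Int) ∈ mc then 1 else 0) := by
  simp [pvCnt, List.range_succ, List.countP_append]

theorem pvCnt_nonneg (mc : List Int) (j : Nat) : 0 ≤ pvCnt mc j := by
  simp [pvCnt]

theorem pvRange_succ_int (m : Nat) :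
    PySem.List.pyRange 0 ((m + 1 : Nat) : Int) 1 =
      PySem.List.pyRange 0 (m : Int) 1 ++ [(m : Int)] := by
  have h : ((m + 1 : Nat) : Int) = (m : Int) + 1 := by push_cast; ring
  rw [h, PySem.List.pyRange_one_succ_right (by exact_mod_cast Int.natCast_nonneg m)]

theorem pvPrefix_eq (mc : List Int) (m : Nat) :
    (PySem.List.pyRange 0 (m : Int) 1).foldl (pvStepPrefix mc) [0] =
      (List.range (m + 1)).map (pvCnt mc) := by
  induction m with
  | zero => simp [PySem.List.pyRange_one_eq_nil, pvCnt_zero]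
  | succ m ih =>
      rw [pvRange_succ_int, List.foldl_append, ih]
      simp only [List.foldl_cons, List.foldl_nil, pvStepPrefix]
      rw [PySem.List.pyGetD_natCast]
      have hget : ((List.range (m + 1)).map (pvCnt mc)).getD m 0 = pvCnt mc m := by
        rw [List.getD_eq_getElem?_getD]
        simp
      rw [hget, List.range_succ (n := m + 1), List.map_append]
      simp [pvCnt_succ]

theorem pvA_loop (seq : String) (mc : List Int) (m : Nat) :
    (PySem.List.pyRange 0 (m : Int) 1).foldl (pvStepA seq mc) (["S"], 0, none) =
      (["S"] ++ (List.range m).flatMap (pvEnt seq mc), pvCnt mc m,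
        if pvCnt mc m = 0 then none else some (pvCnt mc m)) := by
  induction m with
  | zero => simp [PySem.List.pyRange_one_eq_nil, pvCnt_zero]
  | succ m ih =>
      rw [pvRange_succ_int, List.foldl_append, ih]
      simp only [List.foldl_cons, List.foldl_nil, pvStepA]
      have hnn := pvCnt_nonneg mc m
      by_cases hm : (m : Int) ∈ mc
      · have hpos : pvCnt mc m + 1 ≠ 0 := by omega
        simp only [hm, if_pos]
        rw [List.range_succ, List.flatMap_append]
        simp [pvEnt, hm, pvCnt_succ, hpos]
        split <;> simp
      · simp only [hm, if_false]
        rw [List.range_succ, List.flatMap_append]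
        by_cases hc : seq.toList[m]? = some '-'
        · simp [pvEnt, hm, hc, pvCnt_succ]
        · have hgetD : (if pvCnt mc m = 0 then (none : Option Int)
              else some (pvCnt mc m)).getD 0 = pvCnt mc m := by
            split <;> simp_all
          simp [pvEnt, hm, hc, pvCnt_succ, hgetD]

theorem pvB_loop (seq : String) (mc : List Int) (n m : Nat) (hmn : m ≤ n) :
    (PySem.List.pyRange 0 (m : Int) 1).foldl
        (pvStepB seq mc ((List.range (n + 1)).map (pvCnt mc))) ["S"] =
      ["S"] ++ (List.range m).flatMap (pvEnt seq mc) := by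
  induction m with
  | zero => simp [PySem.List.pyRange_one_eq_nil]
  | succ m ih =>
      rw [pvRange_succ_int, List.foldl_append, ih (by omega)]
      simp only [List.foldl_cons, List.foldl_nil, pvStepB]
      rw [PySem.List.pyGetD_natCast]
      have hget : ((List.range (n + 1)).map (pvCnt mc)).getD m 0 = pvCnt mc m := by
        rw [List.getD_eq_getElem?_getD]
        have : m < n + 1 := by omega
        simp [this]
      rw [hget, List.range_succ, List.flatMap_append]
      by_cases hm : (m : Int) ∈ mc
      · simp [pvEnt, hm]
      · by_cases hc : seq.toList[m]? = some '-'
        · simp [pvEnt, hm, hc]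
        · simp [pvEnt, hm, hc]

-- ===== VERDICT (by name: the statement is the Claim_ definition above) =====
theorem get_state_path_spec : Claim_equal_get_state_path := by
  intro seq mc _
  unfold Spec_get_state_path get_state_path get_state_path_alt
  have hlen : PySem.Str.len seq = (seq.toList.length : Int) := PySem.Str.len_eq seq
  simp only [hlen]
  rw [pvPrefix_eq, pvA_loop, pvB_loop seq mc seq.toList.length seq.toList.length le_rfl]
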